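-- pv_equiv track=rewrite | github.com/jms7446/hackerrank | baekjoon/gold/p2229.py | solve
-- ===== SOURCE A (Python) =====
-- def solve(N, xs):
--     # hack, dp[N] will be used for indexing dp[-1] (must be remained 0)
--     dp = [0] * (N + 1)
--
--     for i in range(1, N):
--         high = low = xs[i]
--         dp[i] = dp[i - 1]
--         for j in reversed(range(i)):
--             high = max(high, xs[j])
--             low = min(low, xs[j])
--             dp[i] = max(dp[i], high - low + dp[j - 1])
--     return dp[N - 1]
-- ===== SOURCE B (Python) =====
-- def solve(N, xs):
--     # One forward pass: for every possible start of the current (last) segment we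
--     # keep a candidate (running max, running min, dp value before the segment)
--     # and take the best "dp-before + max - min" as the dp value of the prefix.
--     if N <= 0:
--         return 0
--     prev = 0          # dp value of the prefix ending just before the current element
--     cands = []        # (hi, lo, base) per segment start: hi/lo over the segment, base = dp before it
--     for x in xs[:N]:
--         cands = [(max(h, x), min(l, x), b) for (h, l, b) in cands]
--         cands.append((x, x, prev))
--         prev = max(b + h - l for (h, l, b) in cands)
--     return prev
-- ===== Notes on version B (the rewrite author's own statement) =====
-- stated objective: alternative
-- what changed: A fills a dp array with a backward inner rescan recomputing running max/min from each right endpoint; B makes one forward pass over the values, maintaining for every possible start of the last segment a candidate (running max, running min, dp-before-segment) triple and taking the best candidate as the new dp value, with no index arithmetic or dp array.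
import Mathlib
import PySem

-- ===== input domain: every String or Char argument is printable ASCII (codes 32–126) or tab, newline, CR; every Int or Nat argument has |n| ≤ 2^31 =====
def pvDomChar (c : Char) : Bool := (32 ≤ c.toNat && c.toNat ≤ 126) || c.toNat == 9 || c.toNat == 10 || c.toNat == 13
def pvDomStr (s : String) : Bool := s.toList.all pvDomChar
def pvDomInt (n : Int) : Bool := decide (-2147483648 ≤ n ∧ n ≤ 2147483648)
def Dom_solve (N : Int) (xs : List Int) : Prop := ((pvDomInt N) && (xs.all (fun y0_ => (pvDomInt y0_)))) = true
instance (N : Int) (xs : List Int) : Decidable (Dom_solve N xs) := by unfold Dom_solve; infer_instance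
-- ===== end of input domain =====

-- B replaces A's dp array with backward inner rescans by one forward pass that keeps,
-- per possible start of the last segment, a (running max, running min, dp-before) triple
-- and takes the best candidate as the new dp value (objective: alternative).

-- ===== PORT A =====
-- inner loop body: 'high = max(high, xs[j]); low = min(low, xs[j]); dp[i] = max(dp[i], high - low + dp[j-1])'
def solveAInner (xs : List Int) (i : Int) (st : Int × Int × List Int) (j : Int) : Int × Int × List Int :=
  let high := max st.1 (PySem.List.pyGetD xs j 0)
  let low := min st.2.1 (PySem.List.pyGetD xs j 0)
  let dp := PySem.List.pySetD st.2.2 i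
      (max (PySem.List.pyGetD st.2.2 i 0) (high - low + PySem.List.pyGetD st.2.2 (j - 1) 0))
  (high, low, dp)

-- outer loop body: 'high = low = xs[i]; dp[i] = dp[i-1]; for j in reversed(range(i)): …'
def solveAOuter (xs : List Int) (dp : List Int) (i : Int) : List Int :=
  let x := PySem.List.pyGetD xs i 0
  let dp := PySem.List.pySetD dp i (PySem.List.pyGetD dp (i - 1) 0)
  (((PySem.List.pyRange 0 i 1).reverse).foldl (solveAInner xs i) (x, x, dp)).2.2

def solve (N : Int) (xs : List Int) : Int :=
  let dp := List.replicate (N + 1).toNat 0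
  let dp := (PySem.List.pyRange 1 N 1).foldl (solveAOuter xs) dp
  PySem.List.pyGetD dp (N - 1) 0

-- ===== PORT B =====
-- per-element step: update every candidate triple (hi, lo, base) with the new value,
-- append the singleton segment starting here, take the best 'base + hi - lo'.
def solveBStep (st : Int × List (Int × Int × Int)) (x : Int) : Int × List (Int × Int × Int) :=
  let cands := st.2.map (fun c => (max c.1 x, min c.2.1 x, c.2.2))
  let cands := cands ++ [(x, x, st.1)]
  -- 'max(b + h - l for …)': cands is nonempty here, so the default is never used
  let prev := (PySem.List.max? (cands.map (fun c => c.2.2 + c.1 - c.2.1)) (fun y => y)).getD 0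
  (prev, cands)

def solve_alt (N : Int) (xs : List Int) : Int :=
  if N ≤ 0 then 0
  else ((PySem.List.slice xs (some 0) (some N)).foldl solveBStep (0, [])).1

-- ===== PRECONDITION & SPEC =====
-- A raises IndexError when N < 0 (dp too short) or when 2 ≤ N and xs has fewer than N
-- elements (xs[i] out of range); exactly those inputs are excluded.
def Pre_solve (N : Int) (xs : List Int) : Prop := 0 ≤ N ∧ (N ≤ xs.length ∨ N ≤ 1)
instance (N : Int) (xs : List Int) : Decidable (Pre_solve N xs) := by unfold Pre_solve; infer_instance
def pvWitness_solve : Int × List Int := (3, [1, 5, 2])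


def Spec_solve (N : Int) (xs : List Int) (out : Int) : Prop := out = solve_alt N xs
instance (N : Int) (xs : List Int) (out : Int) : Decidable (Spec_solve N xs out) := by unfold Spec_solve; infer_instance

-- ===== CLAIM (what is proved, stated in full; the proofs are below) =====
def Claim_equal_solve : Prop := ∀ (N : Int) (xs : List Int), Dom_solve N xs → Pre_solve N xs → Spec_solve N xs (solve N xs)

-- ===== LEMMAS AND PROOFS =====

-- value of xs at a nonnegative index (both programs only read in range under Pre_)
def vOf (xs : List Int) (k : Nat) : Int := xs.getD k 0

-- running max / min of xs[j..m-1]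
def runMax (v : Nat → Int) (j m : Nat) : Int :=
  ((List.range (m - (j + 1))).map (fun t => v (j + 1 + t))).foldl max (v j)
def runMin (v : Nat → Int) (j m : Nat) : Int :=
  ((List.range (m - (j + 1))).map (fun t => v (j + 1 + t))).foldl min (v j)

-- dp values of the prefixes: (dkList v m) lists the dp value of prefixes of length 1..m
def dkList (v : Nat → Int) : Nat → List Int
  | 0 => []
  | (m + 1) =>
    let ds := dkList v m
    ds ++ [((List.range m).map (fun j =>
        runMax v j (m + 1) - runMin v j (m + 1) + (if j = 0 then 0 else ds.getD (j - 1) 0))).foldl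
        max (ds.getD (m - 1) 0)]

def dk (v : Nat → Int) (m : Nat) : Int := (dkList v (m + 1)).getD m 0

theorem length_dkList (v : Nat → Int) (m : Nat) : (dkList v m).length = m := by
  induction m with
  | zero => rfl
  | succ m ih => simp [dkList, ih]

theorem getD_append_length (l : List Int) (e : Int) (n : Nat) (h : n = l.length) :
    (l ++ [e]).getD n 0 = e := by
  subst h; simp [List.getD_eq_getElem?_getD]

theorem dk_def (v : Nat → Int) (m : Nat) :
    dk v m = ((List.range m).map (fun j =>
        runMax v j (m + 1) - runMin v j (m + 1) +
          (if j = 0 then 0 else (dkList v m).getD (j - 1) 0))).foldl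
        max ((dkList v m).getD (m - 1) 0) := by
  unfold dk
  conv_lhs => rw [dkList]
  exact getD_append_length _ _ _ (length_dkList v m).symm

theorem dkList_getD (v : Nat → Int) {k m : Nat} (h : k < m) :
    (dkList v m).getD k 0 = dk v k := by
  induction m with
  | zero => omega
  | succ m ih =>
    rcases Nat.lt_or_ge k m with hk | hk
    · rw [← ih hk]
      rw [dkList]
      simp only [List.getD_eq_getElem?_getD]
      rw [List.getElem?_append_left (by rw [length_dkList]; exact hk)]
    · have hkm : k = m := by omega
      subst hkm
      rfl

theorem dk_zero (v : Nat → Int) : dk v 0 = 0 := by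
  rfl

theorem foldl_max_init (l : List Int) (a b : Int) :
    l.foldl max (max a b) = max a (l.foldl max b) := by
  induction l generalizing b with
  | nil => rfl
  | cons x t ih => simp only [List.foldl_cons, max_assoc, ih]

theorem foldl_min_init (l : List Int) (a b : Int) :
    l.foldl min (min a b) = min a (l.foldl min b) := by
  induction l generalizing b with
  | nil => rfl
  | cons x t ih => simp only [List.foldl_cons, min_assoc, ih]

theorem foldl_max_perm_cons {a b : Int} {l l' : List Int}
    (h : (a :: l).Perm (b :: l')) : l.foldl max a = l'.foldl max b := by
  have hA := PySem.List.le_foldl_max l a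
  have hB := PySem.List.le_foldl_max l' b
  have mA := PySem.List.foldl_max_mem l a
  have mB := PySem.List.foldl_max_mem l' b
  apply le_antisymm
  · have hmem : l.foldl max a ∈ b :: l' := by
      apply h.mem_iff.mp
      rcases mA with h1 | h1
      · rw [h1]; exact List.mem_cons_self
      · exact List.mem_cons_of_mem _ h1
    rcases List.mem_cons.mp hmem with h1 | h1
    · rw [h1]; exact hB.1
    · exact hB.2 _ h1
  · have hmem : l'.foldl max b ∈ a :: l := by
      apply h.mem_iff.mpr
      rcases mB with h1 | h1
      · rw [h1]; exact List.mem_cons_self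
      · exact List.mem_cons_of_mem _ h1
    rcases List.mem_cons.mp hmem with h1 | h1
    · rw [h1]; exact hA.1
    · exact hA.2 _ h1

theorem runMax_self (v : Nat → Int) (j : Nat) : runMax v j (j + 1) = v j := by
  simp [runMax]

theorem runMin_self (v : Nat → Int) (j : Nat) : runMin v j (j + 1) = v j := by
  simp [runMin]

theorem runMax_succ_right (v : Nat → Int) {j m : Nat} (h : j ≤ m) :
    runMax v j (m + 1) = max (runMax v j m) (v m) := by
  rcases Nat.lt_or_ge j m with hj | hj
  · unfold runMax
    have h1 : m + 1 - (j + 1) = (m - (j + 1)) + 1 := by omega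
    rw [h1, List.range_succ, List.map_append, List.foldl_append]
    simp only [List.map_cons, List.map_nil, List.foldl_cons, List.foldl_nil]
    congr 1
    congr 1
    omega
  · have hjm : j = m := by omega
    subst hjm
    rw [runMax_self]
    unfold runMax
    simp

theorem runMin_succ_right (v : Nat → Int) {j m : Nat} (h : j ≤ m) :
    runMin v j (m + 1) = min (runMin v j m) (v m) := by
  rcases Nat.lt_or_ge j m with hj | hj
  · unfold runMin
    have h1 : m + 1 - (j + 1) = (m - (j + 1)) + 1 := by omega
    rw [h1, List.range_succ, List.map_append, List.foldl_append]
    simp only [List.map_cons, List.map_nil, List.foldl_cons, List.foldl_nil]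
    congr 1
    congr 1
    omega
  · have hjm : j = m := by omega
    subst hjm
    rw [runMin_self]
    unfold runMin
    simp

theorem runMax_cons_left (v : Nat → Int) {j m : Nat} (h : j + 1 < m) :
    runMax v j m = max (v j) (runMax v (j + 1) m) := by
  unfold runMax
  have h1 : m - (j + 1) = (m - (j + 2)) + 1 := by omega
  rw [h1, List.range_succ_eq_map, List.map_cons, List.foldl_cons]
  rw [show (j + 1 + 0) = j + 1 by omega]
  rw [foldl_max_init]
  congr 1
  rw [List.map_map]
  congr 1
  apply List.map_congr_left
  intro t _
  simp only [Function.comp_apply]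
  congr 1
  omega

theorem runMin_cons_left (v : Nat → Int) {j m : Nat} (h : j + 1 < m) :
    runMin v j m = min (v j) (runMin v (j + 1) m) := by
  unfold runMin
  have h1 : m - (j + 1) = (m - (j + 2)) + 1 := by omega
  rw [h1, List.range_succ_eq_map, List.map_cons, List.foldl_cons]
  rw [show (j + 1 + 0) = j + 1 by omega]
  rw [foldl_min_init]
  congr 1
  rw [List.map_map]
  congr 1
  apply List.map_congr_left
  intro t _
  simp only [Function.comp_apply]
  congr 1
  omega

theorem set_map_range {α : Type} [Inhabited α] (f : Nat → α) (t i : Nat) (w : α) :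
    ((List.range t).map f).set i w = (List.range t).map (fun k => if k = i then w else f k) := by
  apply List.ext_getElem
  · simp
  · intro k h1 h2
    simp only [List.getElem_set, List.getElem_map, List.getElem_range]
    have hk : k < t := by simpa using h2
    rcases eq_or_ne k i with hki | hki
    · simp [hki]
    · simp [hki, Ne.symm hki]

theorem innerLoop (xs : List Int) (n i : Nat) (f : Nat → Int) (hf : f n = 0) (hi : i < n)
    (k : Nat) (hk : k ≤ i) (acc : Int) :
    ((PySem.List.pyRange 0 (k : Int) 1).reverse).foldl (solveAInner xs (i : Int))
      (runMax (vOf xs) k (i + 1), runMin (vOf xs) k (i + 1),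
        ((List.range (n + 1)).map f).set i acc)
    = (runMax (vOf xs) 0 (i + 1), runMin (vOf xs) 0 (i + 1),
        ((List.range (n + 1)).map f).set i
          (((List.range k).reverse.map (fun j =>
              runMax (vOf xs) j (i + 1) - runMin (vOf xs) j (i + 1) +
                (if j = 0 then 0 else f (j - 1)))).foldl max acc)) := by
  induction k generalizing acc with
  | zero =>
    rw [show ((0 : Nat) : Int) = 0 by norm_num, PySem.List.pyRange_one_eq_nil le_rfl]
    simp
  | succ k ih =>
    have hL : ((List.range (n + 1)).map f).length = n + 1 := by simp
    have hLset : (((List.range (n + 1)).map f).set i acc).length = n + 1 := by simp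
    have hstep : solveAInner xs (i : Int)
        (runMax (vOf xs) (k + 1) (i + 1), runMin (vOf xs) (k + 1) (i + 1),
          ((List.range (n + 1)).map f).set i acc) (k : Int)
        = (runMax (vOf xs) k (i + 1), runMin (vOf xs) k (i + 1),
          ((List.range (n + 1)).map f).set i
            (max acc (runMax (vOf xs) k (i + 1) - runMin (vOf xs) k (i + 1) +
              (if k = 0 then 0 else f (k - 1))))) := by
      unfold solveAInner
      have hx : PySem.List.pyGetD xs (k : Int) 0 = vOf xs k := by
        rw [PySem.List.pyGetD_natCast]; rfl
      have hhigh : max (runMax (vOf xs) (k + 1) (i + 1)) (vOf xs k) = runMax (vOf xs) k (i + 1) := by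
        rw [runMax_cons_left (vOf xs) (by omega : k + 1 < i + 1), max_comm]
      have hlow : min (runMin (vOf xs) (k + 1) (i + 1)) (vOf xs k) = runMin (vOf xs) k (i + 1) := by
        rw [runMin_cons_left (vOf xs) (by omega : k + 1 < i + 1), min_comm]
      have hgi : PySem.List.pyGetD (((List.range (n + 1)).map f).set i acc) (i : Int) 0 = acc := by
        rw [PySem.List.pyGetD_natCast, List.getD_eq_getElem?_getD,
          List.getElem?_set_self (by omega)]
        rfl
      have hgj : PySem.List.pyGetD (((List.range (n + 1)).map f).set i acc) ((k : Int) - 1) 0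
          = (if k = 0 then 0 else f (k - 1)) := by
        rcases Nat.eq_zero_or_pos k with hk0 | hk0
        · subst hk0
          rw [show ((0 : Nat) : Int) - 1 = -1 by norm_num]
          rw [set_map_range f (n + 1) i acc]
          rw [PySem.List.pyGetD_neg_one
            ((List.range (n + 1)).map (fun k => if k = i then acc else f k)) 0 (by simp)]
          rw [List.getLast_eq_getElem]
          simp [hf, show ¬ (n = i) from by omega]
        · rw [show (k : Int) - 1 = ((k - 1 : Nat) : Int) by omega]
          rw [PySem.List.pyGetD_natCast, List.getD_eq_getElem?_getD,
            List.getElem?_set_ne (by omega), List.getElem?_map,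
            List.getElem?_range (by omega : k - 1 < n + 1)]
          simp [Nat.pos_iff_ne_zero.mp hk0]
      dsimp only
      rw [hx, hhigh, hlow, hgi, hgj, PySem.List.pySetD_natCast, List.set_set]
    rw [show (((k : Nat) + 1 : Nat) : Int) = (k : Int) + 1 by push_cast; ring]
    rw [PySem.List.pyRange_one_succ_right (by positivity)]
    rw [List.reverse_append, List.reverse_singleton, List.singleton_append, List.foldl_cons]
    rw [hstep, ih (by omega)]
    congr 2
    congr 1
    rw [List.range_succ, List.reverse_append, List.reverse_singleton, List.singleton_append,
      List.map_cons, List.foldl_cons]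

theorem outerInv (xs : List Int) (n : Nat)
    (m : Nat) (hm : m ≤ n - 1) (hn1 : 1 ≤ n) :
    (PySem.List.pyRange 1 ((m + 1 : Nat) : Int) 1).foldl (solveAOuter xs)
        (List.replicate (n + 1) 0)
    = (List.range (n + 1)).map (fun k => if k < m + 1 then dk (vOf xs) k else 0) := by
  induction m with
  | zero =>
    rw [show (((0 : Nat) + 1 : Nat) : Int) = 1 by norm_num, PySem.List.pyRange_one_eq_nil le_rfl]
    simp only [List.foldl_nil]
    apply List.ext_getElem
    · simp
    · intro k h1 h2
      simp only [List.getElem_replicate, List.getElem_map, List.getElem_range]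
      rcases Nat.eq_zero_or_pos k with hk0 | hk0
      · subst hk0; simp [dk_zero]
      · rw [if_neg (by omega)]
  | succ m ih =>
    have hmn : m + 1 < n := by omega
    rw [show (((m + 1 : Nat) + 1 : Nat) : Int) = ((m + 1 : Nat) : Int) + 1 by push_cast; ring]
    rw [PySem.List.pyRange_one_succ_right (by exact_mod_cast Nat.one_le_iff_ne_zero.mpr (by omega))]
    rw [List.foldl_append, ih (by omega)]
    simp only [List.foldl_cons, List.foldl_nil]
    unfold solveAOuter
    have hx : PySem.List.pyGetD xs ((m + 1 : Nat) : Int) 0 = vOf xs (m + 1) := by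
      rw [PySem.List.pyGetD_natCast]; rfl
    have hprev : PySem.List.pyGetD
        ((List.range (n + 1)).map (fun k => if k < m + 1 then dk (vOf xs) k else 0))
        (((m + 1 : Nat) : Int) - 1) 0 = dk (vOf xs) m := by
      rw [show ((m + 1 : Nat) : Int) - 1 = ((m : Nat) : Int) by push_cast; ring]
      rw [PySem.List.pyGetD_natCast, PySem.List.getD_map_range _ _ _ _ (by omega)]
      simp
    have hset : PySem.List.pySetD
        ((List.range (n + 1)).map (fun k => if k < m + 1 then dk (vOf xs) k else 0))
        ((m + 1 : Nat) : Int) (dk (vOf xs) m)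
        = ((List.range (n + 1)).map (fun k => if k < m + 1 then dk (vOf xs) k else 0)).set
            (m + 1) (dk (vOf xs) m) := by
      rw [PySem.List.pySetD_natCast]
    rw [hx, hprev, hset]
    have hinit : vOf xs (m + 1) = runMax (vOf xs) (m + 1) (m + 1 + 1) := (runMax_self _ _).symm
    have hinit' : vOf xs (m + 1) = runMin (vOf xs) (m + 1) (m + 1 + 1) := (runMin_self _ _).symm
    dsimp only
    conv_lhs =>
      rw [show ((vOf xs (m + 1), vOf xs (m + 1),
          ((List.range (n + 1)).map (fun k => if k < m + 1 then dk (vOf xs) k else 0)).set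
            (m + 1) (dk (vOf xs) m)) : Int × Int × List Int)
        = (runMax (vOf xs) (m + 1) (m + 1 + 1), runMin (vOf xs) (m + 1) (m + 1 + 1),
          ((List.range (n + 1)).map (fun k => if k < m + 1 then dk (vOf xs) k else 0)).set
            (m + 1) (dk (vOf xs) m)) from by rw [← hinit, ← hinit']]
    rw [innerLoop xs n (m + 1) _ (by simp [show ¬ (n < m + 1) from by omega]) hmn (m + 1) le_rfl]
    have hX : ((List.range (m + 1)).reverse.map (fun j =>
          runMax (vOf xs) j (m + 1 + 1) - runMin (vOf xs) j (m + 1 + 1) +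
            (if j = 0 then 0 else (if j - 1 < m + 1 then dk (vOf xs) (j - 1) else 0)))).foldl
          max (dk (vOf xs) m) = dk (vOf xs) (m + 1) := by
      conv_rhs => rw [dk_def]
      simp only [Nat.add_sub_cancel]
      rw [dkList_getD (vOf xs) (show m < m + 1 by omega)]
      apply foldl_max_perm_cons
      apply List.Perm.cons
      have h1 : (List.range (m + 1)).reverse.map (fun j =>
            runMax (vOf xs) j (m + 1 + 1) - runMin (vOf xs) j (m + 1 + 1) +
              (if j = 0 then 0 else (if j - 1 < m + 1 then dk (vOf xs) (j - 1) else 0)))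
          = (List.range (m + 1)).reverse.map (fun j =>
            runMax (vOf xs) j (m + 1 + 1) - runMin (vOf xs) j (m + 1 + 1) +
              (if j = 0 then 0 else dk (vOf xs) (j - 1))) := by
        apply List.map_congr_left
        intro j hj
        rw [List.mem_reverse, List.mem_range] at hj
        congr 1
        rcases Nat.eq_zero_or_pos j with hj0 | hj0
        · simp [hj0]
        · have hj1 : j ≠ 0 := by omega
          have hj2 : j - 1 < m + 1 := by omega
          simp [hj1, hj2]
      have h2 : (List.range (m + 1)).map (fun j =>
            runMax (vOf xs) j (m + 1 + 1) - runMin (vOf xs) j (m + 1 + 1) +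
              (if j = 0 then 0 else (dkList (vOf xs) (m + 1)).getD (j - 1) 0))
          = (List.range (m + 1)).map (fun j =>
            runMax (vOf xs) j (m + 1 + 1) - runMin (vOf xs) j (m + 1 + 1) +
              (if j = 0 then 0 else dk (vOf xs) (j - 1))) := by
        apply List.map_congr_left
        intro j hj
        rw [List.mem_range] at hj
        congr 1
        rcases Nat.eq_zero_or_pos j with hj0 | hj0
        · simp [hj0]
        · have hj1 : j ≠ 0 := by omega
          rw [if_neg hj1, if_neg hj1, dkList_getD (vOf xs) (show j - 1 < m + 1 by omega)]
      rw [h1, h2]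
      exact (List.reverse_perm _).map _
    rw [hX]
    rw [set_map_range]
    apply List.map_congr_left
    intro k hk
    rw [List.mem_range] at hk
    rcases eq_or_ne k (m + 1) with hke | hke
    · subst hke; rw [if_pos rfl, if_pos (by omega)]
    · rw [if_neg hke]
      rcases Nat.lt_or_ge k (m + 1) with hlt | hge
      · rw [if_pos hlt, if_pos (by omega)]
      · rw [if_neg (by omega), if_neg (by omega)]

theorem altInv (xs : List Int) (n : Nat) (hlen : n ≤ xs.length) (m : Nat) (hm : m ≤ n) :
    (xs.take m).foldl solveBStep (0, [])
    = ((if m = 0 then 0 else dk (vOf xs) (m - 1)),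
       (List.range m).map (fun j => (runMax (vOf xs) j m, runMin (vOf xs) j m,
          if j = 0 then 0 else dk (vOf xs) (j - 1)))) := by
  induction m with
  | zero => simp
  | succ m ih =>
    have hmlen : m < xs.length := by omega
    have hv : vOf xs m = xs[m] := by
      rw [vOf, List.getD_eq_getElem?_getD, List.getElem?_eq_getElem hmlen]; rfl
    rw [List.take_add_one, List.getElem?_eq_getElem hmlen, ← hv]
    simp only [Option.toList_some]
    rw [List.foldl_append, ih (by omega)]
    simp only [List.foldl_cons, List.foldl_nil]
    unfold solveBStep
    dsimp only
    have hcands : (((List.range m).map (fun j => (runMax (vOf xs) j m, runMin (vOf xs) j m,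
            if j = 0 then 0 else dk (vOf xs) (j - 1)))).map
          (fun c => (max c.1 (vOf xs m), min c.2.1 (vOf xs m), c.2.2)))
          ++ [(vOf xs m, vOf xs m, if m = 0 then 0 else dk (vOf xs) (m - 1))]
        = (List.range (m + 1)).map (fun j => (runMax (vOf xs) j (m + 1), runMin (vOf xs) j (m + 1),
            if j = 0 then 0 else dk (vOf xs) (j - 1))) := by
      rw [List.map_map, List.range_succ, List.map_append]
      congr 1
      · apply List.map_congr_left
        intro j hj
        rw [List.mem_range] at hj
        simp only [Function.comp_apply]
        rw [← runMax_succ_right (vOf xs) (by omega : j ≤ m),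
          ← runMin_succ_right (vOf xs) (by omega : j ≤ m)]
      · simp [runMax_self, runMin_self]
    rw [hcands]
    have hprev : ((PySem.List.max? (((List.range (m + 1)).map
          (fun j => (runMax (vOf xs) j (m + 1), runMin (vOf xs) j (m + 1),
            if j = 0 then 0 else dk (vOf xs) (j - 1)))).map
          (fun c => c.2.2 + c.1 - c.2.1)) (fun y => y)).getD 0) = dk (vOf xs) m := by
      rw [List.map_map]
      simp only [Function.comp_def]
      rcases Nat.eq_zero_or_pos m with hm0 | hm0
      · subst hm0
        rw [dk_zero, List.range_one, List.map_cons, List.map_nil, PySem.List.max?_id_cons]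
        simp only [List.foldl_nil, Option.getD_some]
        rw [show (0 : Nat) + 1 = 0 + 1 by rfl, runMax_self, runMin_self]
        simp
      · rw [List.range_succ_eq_map, List.map_cons, PySem.List.max?_id_cons]
        simp only [Option.getD_some]
        conv_rhs => rw [dk_def]
        rw [dkList_getD (vOf xs) (show m - 1 < m by omega)]
        have e1 : (List.range (m + 1)).map (fun j =>
              (if j = 0 then (0 : Int) else dk (vOf xs) (j - 1)) + runMax (vOf xs) j (m + 1)
                - runMin (vOf xs) j (m + 1))
            = (List.range (m + 1)).map (fun j =>
              runMax (vOf xs) j (m + 1) - runMin (vOf xs) j (m + 1) +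
                (if j = 0 then (0 : Int) else dk (vOf xs) (j - 1))) := by
          apply List.map_congr_left
          intro j hj
          omega
        have e2 : (List.range m).map (fun j =>
              runMax (vOf xs) j (m + 1) - runMin (vOf xs) j (m + 1) +
                (if j = 0 then (0 : Int) else (dkList (vOf xs) m).getD (j - 1) 0))
            = (List.range m).map (fun j =>
              runMax (vOf xs) j (m + 1) - runMin (vOf xs) j (m + 1) +
                (if j = 0 then (0 : Int) else dk (vOf xs) (j - 1))) := by
          apply List.map_congr_left
          intro j hj
          rw [List.mem_range] at hj
          rcases Nat.eq_zero_or_pos j with hj0 | hj0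
          · simp [hj0]
          · have hj1 : j ≠ 0 := by omega
            rw [if_neg hj1, if_neg hj1, dkList_getD (vOf xs) (show j - 1 < m by omega)]
        rw [e2]
        have p1 : ((if (0 : Nat) = 0 then (0 : Int) else dk (vOf xs) (0 - 1)) + runMax (vOf xs) 0 (m + 1)
                - runMin (vOf xs) 0 (m + 1))
              :: ((List.range m).map Nat.succ).map (fun j =>
                (if j = 0 then (0 : Int) else dk (vOf xs) (j - 1)) + runMax (vOf xs) j (m + 1)
                  - runMin (vOf xs) j (m + 1))
            = (List.range (m + 1)).map (fun j =>
                (if j = 0 then (0 : Int) else dk (vOf xs) (j - 1)) + runMax (vOf xs) j (m + 1)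
                  - runMin (vOf xs) j (m + 1)) := by
          rw [List.range_succ_eq_map, List.map_cons]
        have hlast : runMax (vOf xs) m (m + 1) - runMin (vOf xs) m (m + 1) +
            (if m = 0 then (0 : Int) else dk (vOf xs) (m - 1)) = dk (vOf xs) (m - 1) := by
          rw [runMax_self, runMin_self, if_neg (by omega)]
          ring
        have hperm : (((if (0 : Nat) = 0 then (0 : Int) else dk (vOf xs) (0 - 1)) + runMax (vOf xs) 0 (m + 1)
                - runMin (vOf xs) 0 (m + 1))
              :: ((List.range m).map Nat.succ).map (fun j =>
                (if j = 0 then (0 : Int) else dk (vOf xs) (j - 1)) + runMax (vOf xs) j (m + 1)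
                  - runMin (vOf xs) j (m + 1))).Perm
            (dk (vOf xs) (m - 1) :: (List.range m).map (fun j =>
                runMax (vOf xs) j (m + 1) - runMin (vOf xs) j (m + 1) +
                  (if j = 0 then (0 : Int) else dk (vOf xs) (j - 1)))) := by
          rw [p1, e1, List.range_succ, List.map_append]
          simp only [List.map_cons, List.map_nil]
          rw [hlast]
          exact List.perm_append_singleton _ _
        exact foldl_max_perm_cons hperm
    rw [hprev]
    simp only [Nat.add_sub_cancel, if_neg (Nat.succ_ne_zero m)]

theorem solve_eq_alt (N : Int) (xs : List Int) (hpre : Pre_solve N xs) :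
    solve N xs = solve_alt N xs := by
  obtain ⟨hN0, hpre2⟩ := hpre
  have hNn : N = ((N.toNat : Nat) : Int) := by omega
  rcases Nat.eq_zero_or_pos N.toNat with hn0 | hn1
  · have h0 : N = 0 := by omega
    rw [h0]
    unfold solve solve_alt
    rw [if_pos (by norm_num)]
    rw [PySem.List.pyRange_one_eq_nil (by norm_num)]
    simp only [List.foldl_nil]
    decide
  · rcases Nat.lt_or_ge xs.length N.toNat with hlen | hlen
    · have h1 : N = 1 := by
        rcases hpre2 with h | h
        · omega
        · omega
      have hxs : xs = [] := List.eq_nil_of_length_eq_zero (by omega)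
      rw [h1, hxs]
      decide
    · obtain ⟨n, rfl⟩ : ∃ n : Nat, N = (n : Int) := ⟨N.toNat, by omega⟩
      rw [Int.toNat_natCast] at hn1 hlen
      unfold solve solve_alt
      rw [if_neg (by omega)]
      dsimp only
      rw [show (((n : Nat) : Int) + 1).toNat = n + 1 by omega]
      conv_lhs =>
        rw [show ((n : Nat) : Int) = (((n - 1 : Nat) + 1 : Nat) : Int) from by congr 1; omega]
      rw [outerInv xs n (n - 1) (by omega) hn1]
      rw [show (((n - 1 : Nat) + 1 : Nat) : Int) - 1 = ((n - 1 : Nat) : Int) by push_cast; ring]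
      rw [PySem.List.pyGetD_natCast, PySem.List.getD_map_range _ _ _ _ (by omega)]
      rw [if_pos (by omega)]
      rw [PySem.List.slice_zero_start, PySem.List.slice_to_natCast]
      rw [altInv xs n hlen n le_rfl]
      rw [if_neg (by omega)]

-- ===== VERDICT (by name: the statement is the Claim_ definition above) =====
theorem solve_spec : Claim_equal_solve := by
  intro N xs _ hpre
  exact solve_eq_alt N xs hpre
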